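-- pv_equiv track=rewrite | github.com/Bhavyaw1107/Typemaster-OS-Project | ui/widgets/typing_area.py | _split_words_with_indices
-- ===== SOURCE A (Python) =====
-- def _split_words_with_indices(text: str):
--     """
--     Split text into words but preserve their exact spans (including spaces/newlines).
--     We'll treat whitespace between words as part of the following word's prefix when placing.
--     Returns list of tuples: (word_text, start_index, end_index)
--     """
--     words = []
--     i = 0
--     n = len(text)
--     while i < n:
--         # skip leading spaces/newlines and keep them attached to next non-space chunk
--         ws_start = i
--         while i < n and text[i].isspace():
--             i += 1
--         ws = text[ws_start:i]  # could be empty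
--         # now collect non-space chunk
--         chunk_start = i
--         while i < n and not text[i].isspace():
--             i += 1
--         chunk = text[chunk_start:i]
--         if chunk == "" and ws == "":
--             break
--         # If chunk is empty but there were spaces (like trailing spaces or newlines),
--         # represent them as a word of just whitespace so they get rendered (space glyphs)
--         if chunk == "" and ws != "":
--             words.append((ws, ws_start, i))
--         else:
--             # attach preceding whitespace to this chunk (so it moves with the word)
--             full = ws + chunk
--             words.append((full, ws_start, i))
--     return words
-- ===== SOURCE B (Python) =====
-- def _split_words_with_indices(text: str):
--     # One linear state-machine pass over characters: flush the buffered word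
--     # when a space follows a non-space; leftover buffer flushed at the end.
--     words = []
--     buf = ""
--     start = 0
--     for i, ch in enumerate(text):
--         if ch.isspace() and buf and not buf[-1].isspace():
--             words.append((buf, start, i))
--             buf = ch
--             start = i
--         else:
--             buf += ch
--     if buf:
--         words.append((buf, start, len(text)))
--     return words
-- ===== Notes on version B (the rewrite author's own statement) =====
-- stated objective: simpler
-- what changed: Replaced the nested while-loops with index arithmetic and slicing by a single linear state-machine pass over enumerate(text) that buffers the current word and flushes it when a space follows a non-space.
import Mathlib
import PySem

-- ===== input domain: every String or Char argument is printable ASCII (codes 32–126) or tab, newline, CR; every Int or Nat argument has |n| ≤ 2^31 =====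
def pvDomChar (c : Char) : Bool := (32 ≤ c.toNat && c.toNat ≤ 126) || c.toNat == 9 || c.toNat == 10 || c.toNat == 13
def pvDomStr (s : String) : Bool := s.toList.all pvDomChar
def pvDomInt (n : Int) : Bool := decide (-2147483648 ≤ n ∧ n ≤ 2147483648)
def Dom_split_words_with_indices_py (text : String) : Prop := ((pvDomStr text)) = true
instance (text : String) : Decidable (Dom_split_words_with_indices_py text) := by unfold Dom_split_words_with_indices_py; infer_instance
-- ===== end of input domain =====

-- B replaces A's nested while-loops with one linear state-machine pass (simpler decomposition).


-- ===== PORT A =====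
-- termination helper for pvGoA (cited by name in decreasing_by)
theorem pvDropDropLt (p : Char → Bool) (c : Char) (t : List Char) :
    (List.dropWhile (fun x => !p x) (List.dropWhile p (c :: t))).length < (c :: t).length := by
  by_cases h : p c = true
  · have h1 := (List.dropWhile_sublist (l := t) (p := p)).length_le
    have h2 := (List.dropWhile_sublist (l := List.dropWhile p t) (p := fun x => !p x)).length_le
    simp only [List.dropWhile_cons, h, if_true, List.length_cons]
    omega
  · have hf : p c = false := by simpa using h
    have h2 := (List.dropWhile_sublist (l := t) (p := fun x => !p x)).length_le
    simp [List.dropWhile_cons, hf]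
    omega

-- the outer while loop of A: each round takes the ws run then the non-ws chunk (inner whiles = takeWhile/dropWhile)
def pvGoA : List Char → Int → List (String × Int × Int)
  | [], _ => []
  | c :: t, i =>
    let ws := List.takeWhile PySem.Chars.isspace (c :: t)
    let rest := List.dropWhile PySem.Chars.isspace (c :: t)
    let chunk := List.takeWhile (fun x => !PySem.Chars.isspace x) rest
    let rest2 := List.dropWhile (fun x => !PySem.Chars.isspace x) rest
    let j : Int := i + ws.length + chunk.length
    if chunk = [] ∧ ws = [] then []
    else if chunk = [] then (String.ofList ws, i, j) :: pvGoA rest2 j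
    else (String.ofList (ws ++ chunk), i, j) :: pvGoA rest2 j
termination_by l _ => l.length
decreasing_by all_goals exact pvDropDropLt PySem.Chars.isspace c t

def split_words_with_indices_py (text : String) : List (String × Int × Int) :=
  pvGoA text.toList 0

-- ===== PORT B =====
-- one step of B's for-loop over enumerate(text)
def pvStepB (st : List (String × Int × Int) × List Char × Int) (p : Int × Char) :
    List (String × Int × Int) × List Char × Int :=
  if PySem.Chars.isspace p.2 && !st.2.1.isEmpty && !PySem.Chars.isspace (st.2.1.getLastD ' ')
  then (st.1 ++ [(String.ofList st.2.1, st.2.2, p.1)], [p.2], p.1)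
  else (st.1, st.2.1 ++ [p.2], st.2.2)

def split_words_with_indices_py_alt (text : String) : List (String × Int × Int) :=
  let l := text.toList
  let st := (PySem.List.enumerate l).foldl pvStepB ([], [], 0)
  if st.2.1.isEmpty then st.1
  else st.1 ++ [(String.ofList st.2.1, st.2.2, (l.length : Int))]

-- ===== PRECONDITION & SPEC =====
def Spec_split_words_with_indices_py (text : String) (out : List (String × Int × Int)) : Prop := out = split_words_with_indices_py_alt text
instance (text : String) (out : List (String × Int × Int)) : Decidable (Spec_split_words_with_indices_py text out) := by unfold Spec_split_words_with_indices_py; infer_instance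

-- ===== CLAIM (what is proved, stated in full; the proofs are below) =====
def Claim_equal_split_words_with_indices_py : Prop := ∀ (text : String), Dom_split_words_with_indices_py text → Spec_split_words_with_indices_py text (split_words_with_indices_py text)

-- ===== LEMMAS AND PROOFS =====

-- recursive view of B's fold, with the explicit running index
def pvFoldE : List Char → Int → (List (String × Int × Int) × List Char × Int) → (List (String × Int × Int) × List Char × Int)
  | [], _, st => st
  | c :: t, i, st => pvFoldE t (i + 1) (pvStepB st (i, c))

def pvFin (st : List (String × Int × Int) × List Char × Int) (N : Int) : List (String × Int × Int) :=
  if st.2.1.isEmpty then st.1 else st.1 ++ [(String.ofList st.2.1, st.2.2, N)]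

theorem pvEnumFold (l : List Char) : ∀ (i : Int) st,
    (PySem.List.enumerate l i).foldl pvStepB st = pvFoldE l i st := by
  induction l with
  | nil => intro i st; simp [PySem.List.enumerate_nil, pvFoldE]
  | cons c t ih => intro i st; simp [PySem.List.enumerate_cons, List.foldl, pvFoldE, ih]

theorem pvTakeApp (p : Char → Bool) (a : List Char) (ha : ∀ c ∈ a, p c = true) (l : List Char) :
    List.takeWhile p (a ++ l) = a ++ List.takeWhile p l := by
  induction a with
  | nil => simp
  | cons c t ih =>
    simp only [List.cons_append, List.takeWhile_cons, ha c (by simp), if_pos]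
    rw [ih (fun c hc => ha c (by simp [hc]))]

theorem pvDropApp (p : Char → Bool) (a : List Char) (ha : ∀ c ∈ a, p c = true) (l : List Char) :
    List.dropWhile p (a ++ l) = List.dropWhile p l := by
  induction a with
  | nil => simp
  | cons c t ih =>
    simp only [List.cons_append, List.dropWhile_cons, ha c (by simp), if_pos]
    exact ih (fun c hc => ha c (by simp [hc]))

theorem pvDropHead (p : Char → Bool) (l : List Char) (d : Char) (r : List Char)
    (h : List.dropWhile p l = d :: r) : p d = false := by
  induction l with
  | nil => simp at h
  | cons c t ih =>
    by_cases hc : p c = true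
    · exact ih (by simpa [List.dropWhile_cons, hc] using h)
    · have hf : p c = false := by simpa using hc
      simp [List.dropWhile_cons, hf] at h
      exact h.1 ▸ hf

theorem pvLastAll (p : Char → Bool) (d : Char) (hd : p d = true) :
    ∀ l : List Char, (∀ c ∈ l, p c = true) → p (l.getLastD d) = true := by
  intro l
  induction l with
  | nil => intro _; simpa using hd
  | cons c t ih =>
    intro h
    cases t with
    | nil => simpa using h c (by simp)
    | cons c' t' =>
      simpa [List.getLastD] using ih (fun x hx => h x (by simp [hx]))

theorem pvLastAppNe (a : List Char) (b : List Char) (hb : b ≠ []) (d : Char) :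
    (a ++ b).getLastD d = b.getLastD d := by
  cases b with
  | nil => exact absurd rfl hb
  | cons c t =>
    obtain ⟨x, hx⟩ := Option.isSome_iff_exists.mp (List.getLast?_isSome.mpr hb)
    simp [List.getLastD_eq_getLast?, List.getLast?_append_of_ne_nil, hx]

-- ws absorption: feeding a whitespace run never flushes while the buffer is empty or ends in whitespace
theorem pvWsAbsorb (ws : List Char) : ∀ (rest : List Char) (i : Int) out buf start,
    (∀ c ∈ ws, PySem.Chars.isspace c = true) →
    PySem.Chars.isspace (buf.getLastD ' ') = true →
    pvFoldE (ws ++ rest) i (out, buf, start) =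
      pvFoldE rest (i + ws.length) (out, buf ++ ws, start) := by
  induction ws with
  | nil => intro rest i out buf start _ _; simp [pvFoldE]
  | cons c t ih =>
    intro rest i out buf start hall hlast
    have hc : PySem.Chars.isspace c = true := hall c (by simp)
    simp only [List.cons_append, pvFoldE, pvStepB, hc, hlast, Bool.not_true, Bool.and_false,
      Bool.false_and, Bool.and_self, if_neg, Bool.false_eq_true, not_false_iff]
    rw [ih rest (i + 1) out (buf ++ [c]) start (fun x hx => hall x (by simp [hx]))
      (by simpa using hc)]
    have : i + 1 + (t.length : Int) = i + ((c :: t).length : Int) := by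
      simp [List.length_cons]; ring
    rw [this]
    simp [List.append_assoc]

-- chunk absorption: non-whitespace characters are always just appended
theorem pvChunkAbsorb (ch : List Char) : ∀ (rest : List Char) (i : Int) out buf start,
    (∀ c ∈ ch, PySem.Chars.isspace c = false) →
    pvFoldE (ch ++ rest) i (out, buf, start) =
      pvFoldE rest (i + ch.length) (out, buf ++ ch, start) := by
  induction ch with
  | nil => intro rest i out buf start _; simp [pvFoldE]
  | cons c t ih =>
    intro rest i out buf start hall
    have hc : PySem.Chars.isspace c = false := hall c (by simp)
    simp only [List.cons_append, pvFoldE, pvStepB, hc, Bool.false_and, if_neg,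
      Bool.false_eq_true, not_false_iff]
    rw [ih rest (i + 1) out (buf ++ [c]) start (fun x hx => hall x (by simp [hx]))]
    have : i + 1 + (t.length : Int) = i + ((c :: t).length : Int) := by
      simp [List.length_cons]; ring
    rw [this]
    simp [List.append_assoc]

theorem pvLastAllNe (p : Char → Bool) (d : Char) :
    ∀ l : List Char, l ≠ [] → (∀ c ∈ l, p c = true) → p (l.getLastD d) = true := by
  intro l
  induction l with
  | nil => intro h; exact absurd rfl h
  | cons c t ih =>
    intro _ h
    cases t with
    | nil => simpa using h c (by simp)
    | cons c' t' =>
      simpa [List.getLastD] using ih (by simp) (fun x hx => h x (by simp [hx]))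

theorem pvMain (n : Nat) : ∀ (l : List Char), l.length ≤ n → ∀ (i : Int) out (buf : List Char) (start : Int),
    (∀ c ∈ buf, PySem.Chars.isspace c = true) →
    start = i - buf.length →
    pvFin (pvFoldE l i (out, buf, start)) (i + l.length) = out ++ pvGoA (buf ++ l) start := by
  induction n using Nat.strong_induction_on with
  | _ n ih =>
  intro l hl i out buf start hbuf hstart
  by_cases hnil : buf ++ l = []
  · obtain ⟨hb, hl0⟩ := List.append_eq_nil_iff.mp hnil
    subst hb; subst hl0
    simp [pvFoldE, pvFin, pvGoA]
  · -- decompose l into its leading whitespace run, the following chunk, and the remainder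
    set p := PySem.Chars.isspace with hp
    set q : Char → Bool := fun x => !p x with hq
    set ws := List.takeWhile p l with hws_def
    set rest := List.dropWhile p l with hrest_def
    set chunk := List.takeWhile q rest with hchunk_def
    set rest2 := List.dropWhile q rest with hrest2_def
    have hldec : l = ws ++ (chunk ++ rest2) := by
      rw [hchunk_def, hrest2_def, List.takeWhile_append_dropWhile, hws_def, hrest_def,
        List.takeWhile_append_dropWhile]
    have hws : ∀ c ∈ ws, p c = true := fun c hc => List.mem_takeWhile_imp hc
    have hchunkq : ∀ c ∈ chunk, q c = true := fun c hc => List.mem_takeWhile_imp hc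
    have hlast0 : p (buf.getLastD ' ') = true :=
      pvLastAll p ' ' (by decide) buf hbuf
    -- run B through ws then chunk
    rw [(by rw [← hldec] : pvFoldE l i (out, buf, start) = pvFoldE (ws ++ (chunk ++ rest2)) i (out, buf, start))]
    rw [pvWsAbsorb ws (chunk ++ rest2) i out buf start hws hlast0]
    rw [pvChunkAbsorb chunk rest2 (i + ws.length) out (buf ++ ws) start
      (fun c hc => by simpa [hq] using hchunkq c hc)]
    -- A makes exactly one round on buf ++ l
    have htake : List.takeWhile p (buf ++ l) = buf ++ ws := by
      rw [pvTakeApp p buf hbuf l, hws_def]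
    have hdrop : List.dropWhile p (buf ++ l) = rest := by
      rw [pvDropApp p buf hbuf l, hrest_def]
    obtain ⟨c, t, hct⟩ : ∃ c t, buf ++ l = c :: t := by
      cases h : buf ++ l with
      | nil => exact absurd h hnil
      | cons c t => exact ⟨c, t, rfl⟩
    have hgo : pvGoA (buf ++ l) start =
        (if chunk = [] ∧ buf ++ ws = [] then []
         else if chunk = [] then
           (String.ofList (buf ++ ws), start, start + ((buf ++ ws).length : Int) + (chunk.length : Int)) :: pvGoA rest2 (start + ((buf ++ ws).length : Int) + (chunk.length : Int))
         else
           (String.ofList ((buf ++ ws) ++ chunk), start, start + ((buf ++ ws).length : Int) + (chunk.length : Int)) :: pvGoA rest2 (start + ((buf ++ ws).length : Int) + (chunk.length : Int))) := by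
      rw [hct, pvGoA, ← hct, htake, hdrop, ← hchunk_def, ← hrest2_def]
    have hj : start + ((buf ++ ws).length : Int) + (chunk.length : Int)
        = i + (ws.length : Int) + (chunk.length : Int) := by
      rw [hstart]; simp [List.length_append]; ring
    rw [hgo, hj]
    cases hrest2 : rest2 with
    | nil =>
      -- trailing case: everything left sits in the buffer; the final flush emits it
      have hne : buf ++ ws ++ chunk ≠ [] := by
        intro h
        apply hnil
        rw [hldec, hrest2]
        simpa [List.append_assoc] using h
      have hlen : i + (l.length : Int) = i + (ws.length : Int) + (chunk.length : Int) := by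
        rw [hldec, hrest2]; simp [List.length_append]; ring
      simp only [pvFoldE, pvFin, hlen]
      by_cases hch : chunk = []
      · have hbw : buf ++ ws ≠ [] := by simpa [hch] using hne
        simp [hch, hbw, List.isEmpty_iff, pvGoA]
      · simp [hch, List.isEmpty_iff, List.append_assoc, pvGoA]
    | cons d r =>
      -- a space follows the chunk: B flushes exactly A's emitted word, recurse
      have hdq : q d = false := pvDropHead q rest d r (by rw [← hrest2_def, hrest2])
      have hdp : p d = true := by simpa [hq] using hdq
      have hchne : chunk ≠ [] := by
        intro h
        have : rest = d :: r := by rw [← List.takeWhile_append_dropWhile (p := q) (l := rest), ← hchunk_def, ← hrest2_def, h, hrest2]; simp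
        have := pvDropHead p l d r (by rw [← hrest_def, this])
        rw [this] at hdp; exact absurd hdp (by simp)
      have hlastc : p ((buf ++ ws ++ chunk).getLastD ' ') = false := by
        rw [pvLastAppNe (buf ++ ws) chunk hchne]
        have := pvLastAllNe q ' ' chunk hchne hchunkq
        simpa [hq] using this
      have hbne : (buf ++ ws ++ chunk).isEmpty = false := by
        simp [List.append_assoc]
        intro h1 h2; exact hchne
      have hdp' : PySem.Chars.isspace d = true := hdp
      have hbne' : (buf ++ ws ++ chunk).isEmpty = false := hbne
      have hlastc' : PySem.Chars.isspace ((buf ++ ws ++ chunk).getLastD ' ') = false := hlastc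
      simp only [pvFoldE, pvStepB]
      rw [if_pos (by rw [hdp', hbne', hlastc']; rfl :
        (PySem.Chars.isspace d && !(buf ++ ws ++ chunk).isEmpty &&
          !PySem.Chars.isspace ((buf ++ ws ++ chunk).getLastD ' ')) = true)]

      have hr : r.length < n := by
        have : l.length = ws.length + chunk.length + (1 + r.length) := by
          rw [hldec, hrest2]; simp [List.length_append]; ring
        omega
      have hIH := ih r.length hr r le_rfl (i + (ws.length : Int) + (chunk.length : Int) + 1)
        (out ++ [(String.ofList (buf ++ ws ++ chunk), start, i + (ws.length : Int) + (chunk.length : Int))])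
        [d] (i + (ws.length : Int) + (chunk.length : Int))
        (by intro x hx; simp at hx; rw [hx]; exact hdp)
        (by simp)
      have hlen2 : i + (l.length : Int) = i + (ws.length : Int) + (chunk.length : Int) + 1 + (r.length : Int) := by
        rw [hldec, hrest2]; simp [List.length_append]; ring
      rw [hlen2]
      rw [hIH]
      have hch : ¬ (chunk = [] ∧ buf ++ ws = []) := fun h => hchne h.1
      simp [hchne, List.append_assoc]

-- ===== VERDICT (by name: the statement is the Claim_ definition above) =====
theorem split_words_with_indices_py_spec : Claim_equal_split_words_with_indices_py := by
  intro text _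
  unfold Spec_split_words_with_indices_py split_words_with_indices_py split_words_with_indices_py_alt
  simp only [pvEnumFold]
  have h := pvMain text.toList.length text.toList le_rfl 0 [] [] 0 (by simp) (by simp)
  simp only [List.nil_append, zero_add] at h
  rw [← h]
  simp [pvFin]
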